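-- pv_equiv track=rewrite | github.com/Fijuwat/CS-Projects | MockExam2.py | duelingTanks
-- ===== SOURCE A (Python) =====
-- def duelingTanks(grid):
--     totalduel = 0
--     # replace pass with your solution to problem 4 here
--     for row in grid:
--         tanks = 0
--         for thing in row:
--             if thing == "T":
--                 tanks += 1
--         if tanks > 0:
--             totalduel += (tanks-1)
--
--
--     for k in range(len(grid[0])):
--         tanks = 0
--         for thing in grid:
--           if (thing[k] == "T"):
--               tanks += 1
--         if tanks > 0:
--             totalduel += (tanks-1)
--
--     return(totalduel)
-- ===== SOURCE B (Python) =====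
-- def duelingTanks(grid):
--     # One row-major pass building a column-count table, instead of re-scanning
--     # the whole grid once per column.
--     ncols = len(grid[0])
--     col_counts = [0] * ncols
--     total = 0
--     for row in grid:
--         tanks = row.count("T")
--         if tanks > 0:
--             total += tanks - 1
--         col_counts = [c + (1 if row[k] == "T" else 0) for k, c in enumerate(col_counts)]
--     for c in col_counts:
--         if c > 0:
--             total += c - 1
--     return total
-- ===== Notes on version B (the rewrite author's own statement) =====
-- stated objective: alternative
-- what changed: Single row-major pass that tallies per-column tank counts into a table (plus row.count per row), replacing A's per-column re-scan of the whole grid; similar total cost.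
import Mathlib
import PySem

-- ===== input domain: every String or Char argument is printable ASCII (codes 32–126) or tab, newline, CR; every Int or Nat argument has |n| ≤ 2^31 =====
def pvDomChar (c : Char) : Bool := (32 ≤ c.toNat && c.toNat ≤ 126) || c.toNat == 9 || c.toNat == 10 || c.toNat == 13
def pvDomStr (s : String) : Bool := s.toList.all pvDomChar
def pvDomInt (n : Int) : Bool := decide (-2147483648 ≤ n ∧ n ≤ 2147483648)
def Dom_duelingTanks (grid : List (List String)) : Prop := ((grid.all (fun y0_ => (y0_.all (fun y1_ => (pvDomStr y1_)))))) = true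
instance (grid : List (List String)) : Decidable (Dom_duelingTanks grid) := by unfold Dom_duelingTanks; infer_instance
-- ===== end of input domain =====

-- B replaces A's per-column re-scan of the grid by a single row-major pass that
-- builds a column-count table (same asymptotic cost, different traversal).


-- ===== PORT A =====
def duelingTanks (grid : List (List String)) : Int :=
  -- first loop: per-row tank count
  let t1 : Int := grid.foldl (fun acc row =>
    let tanks : Int := row.foldl (fun t thing => if thing == "T" then t + 1 else t) 0
    if tanks > 0 then acc + (tanks - 1) else acc) 0
  -- second loop: for k in range(len(grid[0])), count tanks in column k
  -- (grid[0] and thing[k] raise outside Pre_; pyGetD's default is never read inside Pre_)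
  (PySem.List.pyRange 0 ((PySem.List.pyGetD grid 0 []).length : Int) 1).foldl (fun acc k =>
    let tanks : Int := grid.foldl (fun t thing =>
      if PySem.List.pyGetD thing k "" == "T" then t + 1 else t) 0
    if tanks > 0 then acc + (tanks - 1) else acc) t1

-- ===== PORT B =====
def duelingTanks_alt (grid : List (List String)) : Int :=
  let ncols := (PySem.List.pyGetD grid 0 []).length
  let st := grid.foldl (fun (st : Int × List Int) row =>
    let tanks : Int := (PySem.List.count row "T" : Int)
    let total' := if tanks > 0 then st.1 + (tanks - 1) else st.1
    let cols' := (PySem.List.enumerate st.2).map (fun kc =>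
      kc.2 + (if PySem.List.pyGetD row kc.1 "" == "T" then 1 else 0))
    (total', cols')) ((0 : Int), List.replicate ncols (0 : Int))
  st.2.foldl (fun acc c => if c > 0 then acc + (c - 1) else acc) st.1

-- ===== PRECONDITION & SPEC =====
-- Pre_ excludes exactly the inputs where the Python raises IndexError: the empty grid
-- (grid[0]) and grids with a row shorter than the first row (row[k] in the column scan).
def Pre_duelingTanks (grid : List (List String)) : Prop :=
  grid ≠ [] ∧ ∀ row ∈ grid, (PySem.List.pyGetD grid 0 []).length ≤ row.length
instance (grid : List (List String)) : Decidable (Pre_duelingTanks grid) := by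
  unfold Pre_duelingTanks; infer_instance
def pvWitness_duelingTanks : List (List String) := [["T", "."], [".", "T"]]
def Spec_duelingTanks (grid : List (List String)) (out : Int) : Prop := out = duelingTanks_alt grid
instance (grid : List (List String)) (out : Int) : Decidable (Spec_duelingTanks grid out) := by unfold Spec_duelingTanks; infer_instance

-- ===== CLAIM (what is proved, stated in full; the proofs are below) =====
def Claim_equal_duelingTanks : Prop := ∀ (grid : List (List String)), Dom_duelingTanks grid → Pre_duelingTanks grid → Spec_duelingTanks grid (duelingTanks grid)

-- ===== LEMMAS AND PROOFS =====

-- the per-column contribution of one row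
def pvColHit (row : List String) (k : Int) : Int :=
  if PySem.List.pyGetD row k "" == "T" then 1 else 0

lemma enumerate_map_range {α : Type} (f : Nat → α) (n : Nat) :
    PySem.List.enumerate ((List.range n).map f) 0
      = (List.range n).map (fun k : Nat => ((k : Int), f k)) := by
  apply List.ext_getElem
  · simp [PySem.List.length_enumerate]
  · intro k h1 h2
    simp only [PySem.List.getElem_enumerate, List.getElem_map, List.getElem_range]
    simp

-- the column-count table after folding B's update over the rows
lemma colsFold (rows : List (List String)) (n : Nat) (f : Nat → Int) :
    rows.foldl (fun cs row => (PySem.List.enumerate cs).map (fun kc =>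
        kc.2 + (if PySem.List.pyGetD row kc.1 "" == "T" then 1 else 0)))
      ((List.range n).map f)
      = (List.range n).map (fun k => f k + (rows.map (fun r => pvColHit r k)).sum) := by
  induction rows generalizing f with
  | nil => simp
  | cons r rows ih =>
    simp only [List.foldl_cons]
    rw [enumerate_map_range, List.map_map]
    have : ((fun kc : Int × Int =>
        kc.2 + (if PySem.List.pyGetD r kc.1 "" == "T" then 1 else 0)) ∘
        (fun k : Nat => ((k : Int), f k)))
        = fun k : Nat => f k + pvColHit r k := by
      funext k; simp [pvColHit]
    rw [this, ih (fun k => f k + pvColHit r k)]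
    apply List.map_congr_left
    intro k _
    simp only [List.map_cons, List.sum_cons]
    ring

-- A's inner column scan is the sum of pvColHit over the rows
lemma colScan (rows : List (List String)) (k : Int) :
    rows.foldl (fun t thing =>
        if PySem.List.pyGetD thing k "" == "T" then t + 1 else t) 0
      = (rows.map (fun r => pvColHit r k)).sum := by
  have h : rows.foldl (fun t thing =>
      if PySem.List.pyGetD thing k "" == "T" then t + 1 else t) 0
      = rows.foldl (fun t thing => t + pvColHit thing k) 0 := by
    apply PySem.List.foldl_congr_mem
    intro acc x _
    simp [pvColHit]; split <;> simp
  rw [h, PySem.List.foldl_add rows (fun r => pvColHit r k) 0]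
  simp

theorem duelingTanks_eq_alt (grid : List (List String)) :
    duelingTanks grid = duelingTanks_alt grid := by
  simp only [duelingTanks, duelingTanks_alt]
  rw [PySem.List.foldl_prod_mk
    (f := fun acc row =>
      if ((PySem.List.count row "T" : Int)) > 0
      then acc + ((PySem.List.count row "T" : Int) - 1) else acc)
    (g := fun cs row => (PySem.List.enumerate cs).map (fun kc =>
      kc.2 + (if PySem.List.pyGetD row kc.1 "" == "T" then 1 else 0)))]
  have hrepl : (List.replicate (PySem.List.pyGetD grid 0 []).length (0 : Int))
      = (List.range (PySem.List.pyGetD grid 0 []).length).map (fun _ => (0 : Int)) := by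
    simp [List.map_const']
  rw [hrepl, colsFold grid _ (fun _ => (0 : Int))]
  -- row passes agree
  have hrow : grid.foldl (fun acc row =>
      let tanks : Int := row.foldl (fun t thing => if thing == "T" then t + 1 else t) 0
      if tanks > 0 then acc + (tanks - 1) else acc) 0
      = grid.foldl (fun acc row =>
        if ((PySem.List.count row "T" : Int)) > 0
        then acc + ((PySem.List.count row "T" : Int) - 1) else acc) 0 := by
    apply PySem.List.foldl_congr_mem
    intro acc row _
    have := PySem.List.foldl_beq_add_one row "T" 0
    simp only [this, PySem.List.count_eq]
    simp
  rw [hrow]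
  -- column passes agree
  rw [PySem.List.pyRange_zero_nat, List.foldl_map, List.foldl_map]
  apply PySem.List.foldl_congr_mem
  intro acc k _
  rw [colScan grid (k : Int)]
  simp

-- ===== VERDICT (by name: the statement is the Claim_ definition above) =====
theorem duelingTanks_spec : Claim_equal_duelingTanks := by
  intro grid _ _
  unfold Spec_duelingTanks
  exact duelingTanks_eq_alt grid
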